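-- pv_equiv track=rewrite | github.com/ComputersMania/python-stuff | mele.py | picked
-- ===== SOURCE A (Python) =====
-- pickRate = [0, 2, 3, 4, 5, 6, 7]
--
-- def picked(startDay, startPop, life):                                                     #StartDay: giorno della settimana del primo giorno di raccolta, life:durata in giorni della raccolta
--     population = startPop
--     picked = 0
--     for day in range(0 + startDay, life + startDay):
--         currentPickRate = pickRate[day % len(pickRate)]
--         if population >= currentPickRate:
--             picked += currentPickRate
--             population -= currentPickRate
--         population += 1
--     return picked
-- ===== SOURCE B (Python) =====
-- pickRate = [0, 2, 3, 4, 5, 6, 7]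
--
-- def picked(startDay, startPop, life):
--     # Fast exact re-implementation: closed-form skips for the three regimes
--     # (negative population: no picks; large population: 27 picks per week,
--     # net -20/week; small population: after a <=20-day transient the state is
--     # on a 14-day cycle picking exactly 14 per cycle).
--     total = 0
--     pop = startPop
--     day = startDay
--     n = life if life > 0 else 0
--     if n > 0 and pop < 0:
--         k = min(n, -pop)
--         pop += k
--         day += k
--         n -= k
--     while n > 0:
--         if pop >= 27 and n >= 7:
--             k = min(n // 7, (pop - 27) // 20 + 1)
--             total += 27 * k
--             pop -= 20 * k
--             day += 7 * k
--             n -= 7 * k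
--         elif n > 34:
--             for _ in range(20):
--                 r = pickRate[day % 7]
--                 if pop >= r:
--                     total += r
--                     pop -= r
--                 pop += 1
--                 day += 1
--                 n -= 1
--             jump = (n // 14) * 14
--             total += jump
--             day += jump
--             n -= jump
--         else:
--             r = pickRate[day % 7]
--             if pop >= r:
--                 total += r
--                 pop -= r
--             pop += 1
--             day += 1
--             n -= 1
--     return total
-- ===== Notes on version B (the rewrite author's own statement) =====
-- stated objective: faster
-- what changed: A simulates every one of the `life` days; B jumps over whole regimes in closed form: a no-pick skip while population is negative, bulk full weeks (27 picks, net -20 population per week) while population >= 27, and, after a 20-day transient that provably lands on one of the two 14-day attractor cycles (which pick exactly 14 per 14 days), a single multiplication over all remaining full cycles, simulating only O(1) leftover days.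
import Mathlib
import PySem

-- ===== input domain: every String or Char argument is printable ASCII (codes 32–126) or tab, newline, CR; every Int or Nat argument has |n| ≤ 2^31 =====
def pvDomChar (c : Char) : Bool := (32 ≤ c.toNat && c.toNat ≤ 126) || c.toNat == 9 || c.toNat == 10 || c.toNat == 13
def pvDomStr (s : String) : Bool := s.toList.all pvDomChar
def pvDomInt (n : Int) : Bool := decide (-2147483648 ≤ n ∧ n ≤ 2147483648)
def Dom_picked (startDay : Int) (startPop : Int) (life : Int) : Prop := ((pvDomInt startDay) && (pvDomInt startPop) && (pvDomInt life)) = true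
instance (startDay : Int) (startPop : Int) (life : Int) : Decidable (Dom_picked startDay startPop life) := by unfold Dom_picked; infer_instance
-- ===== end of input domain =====

-- B replaces A's day-by-day O(life) simulation by closed-form jumps over three regimes
-- (negative population, large population via 27-per-week bulk weeks, and the 14-day
-- steady cycle after a 20-day transient); same return value, asymptotically faster.


-- ===== PORT A =====
-- module-level constant pickRate = [0, 2, 3, 4, 5, 6, 7]
def pickRate : List Int := [0, 2, 3, 4, 5, 6, 7]

-- A: for day in range(0+startDay, life+startDay): rate = pickRate[day % len(pickRate)]; …
-- the index day % 7 is always in [0,7), so pyGetD with default 0 is exact here.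
def picked (startDay : Int) (startPop : Int) (life : Int) : Int :=
  ((PySem.List.pyRange (0 + startDay) (life + startDay) 1).foldl
    (fun (st : Int × Int) day =>
      let currentPickRate := PySem.List.pyGetD pickRate (PySem.Int.mod day (pickRate.length : Int)) 0
      if currentPickRate ≤ st.1 then (st.1 - currentPickRate + 1, st.2 + currentPickRate)
      else (st.1 + 1, st.2))
    (startPop, 0)).2

-- ===== PORT B =====
-- Source B helper: simulate k single days; returns (day, pop, total)
def simdays : Nat → Int → Int → Int → Int × Int × Int
  | 0, day, pop, total => (day, pop, total)
  | k+1, day, pop, total =>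
    let r := PySem.List.pyGetD pickRate (PySem.Int.mod day 7) 0
    if r ≤ pop then simdays k (day + 1) (pop - r + 1) (total + r)
    else simdays k (day + 1) (pop + 1) total

-- Source B main while-loop (n = remaining days)
def bLoop (day pop total n : Int) : Int :=
  if h0 : 0 < n then
    if hb : 27 ≤ pop ∧ 7 ≤ n then
      let k := min (PySem.Int.floordiv n 7) (PySem.Int.floordiv (pop - 27) 20 + 1)
      bLoop (day + 7*k) (pop - 20*k) (total + 27*k) (n - 7*k)
    else if hc : 34 < n then
      let s := simdays 20 day pop total
      let jump := (PySem.Int.floordiv (n - 20) 14) * 14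
      bLoop (s.1 + jump) s.2.1 (s.2.2 + jump) (n - 20 - jump)
    else
      let s := simdays 1 day pop total
      bLoop s.1 s.2.1 s.2.2 (n - 1)
  else total
termination_by n.toNat
decreasing_by
  · have h7 : PySem.Int.floordiv n 7 = n / 7 := PySem.Int.floordiv_eq_ediv_of_pos (by norm_num)
    have h20 : PySem.Int.floordiv (pop - 27) 20 = (pop - 27) / 20 :=
      PySem.Int.floordiv_eq_ediv_of_pos (by norm_num)
    simp only [h7, h20]
    omega
  · have h14 : PySem.Int.floordiv (n - 20) 14 = (n - 20) / 14 :=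
      PySem.Int.floordiv_eq_ediv_of_pos (by norm_num)
    simp only [h14]
    omega
  · omega

def picked_alt (startDay : Int) (startPop : Int) (life : Int) : Int :=
  let n := if 0 < life then life else 0
  if 0 < n ∧ startPop < 0 then
    let k := min n (-startPop)
    bLoop (startDay + k) (startPop + k) 0 (n - k)
  else
    bLoop startDay startPop 0 n

-- ===== PRECONDITION & SPEC =====
def Spec_picked (startDay : Int) (startPop : Int) (life : Int) (out : Int) : Prop := out = picked_alt startDay startPop life
instance (startDay : Int) (startPop : Int) (life : Int) (out : Int) : Decidable (Spec_picked startDay startPop life out) := by unfold Spec_picked; infer_instance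

-- ===== CLAIM (what is proved, stated in full; the proofs are below) =====
def Claim_equal_picked : Prop := ∀ (startDay : Int) (startPop : Int) (life : Int), Dom_picked startDay startPop life → Spec_picked startDay startPop life (picked startDay startPop life)

-- ===== LEMMAS AND PROOFS =====

-- the daily rate, as a function of the day number
def rateOf (d : Int) : Int := PySem.List.pyGetD pickRate (PySem.Int.mod d 7) 0

-- reference semantics: picks and population after n days starting at day d, population p
def F : Nat → Int → Int → Int
  | 0, _, _ => 0
  | n+1, d, p => if rateOf d ≤ p then rateOf d + F n (d+1) (p - rateOf d + 1) else F n (d+1) (p+1)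

def Pop : Nat → Int → Int → Int
  | 0, _, p => p
  | n+1, d, p => if rateOf d ≤ p then Pop n (d+1) (p - rateOf d + 1) else Pop n (d+1) (p+1)

theorem rateOf_eq (d : Int) : rateOf d = if d % 7 = 0 then 0 else d % 7 + 1 := by
  unfold rateOf
  rw [PySem.Int.mod_eq_emod_of_pos (by norm_num)]
  rcases (show d % 7 = 0 ∨ d % 7 = 1 ∨ d % 7 = 2 ∨ d % 7 = 3 ∨ d % 7 = 4 ∨ d % 7 = 5 ∨ d % 7 = 6 from by omega) with h|h|h|h|h|h|h <;> rw [h] <;> decide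

theorem F_pick {n : Nat} {d p : Int} (h : rateOf d ≤ p) :
    F (n+1) d p = rateOf d + F n (d+1) (p - rateOf d + 1) := by simp [F, h]

theorem F_nopick {n : Nat} {d p : Int} (h : ¬ rateOf d ≤ p) :
    F (n+1) d p = F n (d+1) (p+1) := by simp [F, h]

theorem Pop_pick {n : Nat} {d p : Int} (h : rateOf d ≤ p) :
    Pop (n+1) d p = Pop n (d+1) (p - rateOf d + 1) := by simp [Pop, h]

theorem Pop_nopick {n : Nat} {d p : Int} (h : ¬ rateOf d ≤ p) :
    Pop (n+1) d p = Pop n (d+1) (p+1) := by simp [Pop, h]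

theorem rate_nonneg (d : Int) : 0 ≤ rateOf d := by rw [rateOf_eq]; split <;> omega

-- F and Pop depend on the day only through its residue mod 7
theorem FPop_congr (n : Nat) : ∀ (d e p : Int), d % 7 = e % 7 →
    F n d p = F n e p ∧ Pop n d p = Pop n e p := by
  induction n with
  | zero => intro d e p _; exact ⟨rfl, rfl⟩
  | succ n ih =>
    intro d e p h
    have hr : rateOf d = rateOf e := by rw [rateOf_eq, rateOf_eq, h]
    have h1 : (d+1) % 7 = (e+1) % 7 := by omega
    by_cases hc : rateOf d ≤ p
    · rw [F_pick hc, F_pick (hr ▸ hc), Pop_pick hc, Pop_pick (hr ▸ hc), hr]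
      exact ⟨by rw [(ih _ _ _ h1).1], (ih _ _ _ h1).2⟩
    · rw [F_nopick hc, F_nopick (hr ▸ hc), Pop_nopick hc, Pop_nopick (hr ▸ hc)]
      exact ih _ _ _ h1

-- composition: running a+b days = running a days, then b days from the reached state
theorem FPop_add (a : Nat) : ∀ (b : Nat) (d p : Int),
    F (a+b) d p = F a d p + F b (d + a) (Pop a d p) ∧
    Pop (a+b) d p = Pop b (d + a) (Pop a d p) := by
  induction a with
  | zero => intro b d p; simp [F, Pop]
  | succ a ih =>
    intro b d p
    have hcnt : a + 1 + b = (a + b) + 1 := by omega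
    have hd : d + 1 + (a:Int) = d + ((a:Nat)+1 : Nat) := by push_cast; ring
    by_cases hc : rateOf d ≤ p
    · rw [hcnt, F_pick hc, F_pick hc, Pop_pick hc, Pop_pick hc]
      refine ⟨?_, ?_⟩
      · rw [(ih b (d+1) (p - rateOf d + 1)).1, hd]; ring
      · rw [(ih b (d+1) (p - rateOf d + 1)).2, hd]
    · rw [hcnt, F_nopick hc, F_nopick hc, Pop_nopick hc, Pop_nopick hc]
      refine ⟨?_, ?_⟩
      · rw [(ih b (d+1) (p+1)).1, hd]
      · rw [(ih b (d+1) (p+1)).2, hd]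

theorem F_week (n : Nat) (d p : Int) (hp : 27 ≤ p) :
    F (n+7) d p = 27 + F n (d+7) (p-20) := by
  rcases (show d % 7 = 0 ∨ d % 7 = 1 ∨ d % 7 = 2 ∨ d % 7 = 3 ∨ d % 7 = 4 ∨ d % 7 = 5 ∨ d % 7 = 6 from by omega) with hm|hm|hm|hm|hm|hm|hm
  ·
    have e0 : rateOf d = 0 := by rw [rateOf_eq]; split <;> omega
    have e1 : rateOf (d + 1) = 2 := by rw [rateOf_eq]; split <;> omega
    have e2 : rateOf (d + 2) = 3 := by rw [rateOf_eq]; split <;> omega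
    have e3 : rateOf (d + 3) = 4 := by rw [rateOf_eq]; split <;> omega
    have e4 : rateOf (d + 4) = 5 := by rw [rateOf_eq]; split <;> omega
    have e5 : rateOf (d + 5) = 6 := by rw [rateOf_eq]; split <;> omega
    have e6 : rateOf (d + 6) = 7 := by rw [rateOf_eq]; split <;> omega
    rw [show n+7 = n+6+1 from by omega]
    rw [F_pick (h := show rateOf (d) ≤ p from by rw [e0]; omega)]
    simp only [e0]
    rw [show n+6 = n+5+1 from by omega]
    rw [F_pick (h := show rateOf (d + 1) ≤ p - 0 + 1 from by rw [e1]; omega)]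
    simp only [e1]
    rw [show d + 1 + 1 = d + 2 from by ring]
    rw [show n+5 = n+4+1 from by omega]
    rw [F_pick (h := show rateOf (d + 2) ≤ p - 0 + 1 - 2 + 1 from by rw [e2]; omega)]
    simp only [e2]
    rw [show d + 2 + 1 = d + 3 from by ring]
    rw [show n+4 = n+3+1 from by omega]
    rw [F_pick (h := show rateOf (d + 3) ≤ p - 0 + 1 - 2 + 1 - 3 + 1 from by rw [e3]; omega)]
    simp only [e3]
    rw [show d + 3 + 1 = d + 4 from by ring]
    rw [show n+3 = n+2+1 from by omega]
    rw [F_pick (h := show rateOf (d + 4) ≤ p - 0 + 1 - 2 + 1 - 3 + 1 - 4 + 1 from by rw [e4]; omega)]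
    simp only [e4]
    rw [show d + 4 + 1 = d + 5 from by ring]
    rw [show n+2 = n+1+1 from by omega]
    rw [F_pick (h := show rateOf (d + 5) ≤ p - 0 + 1 - 2 + 1 - 3 + 1 - 4 + 1 - 5 + 1 from by rw [e5]; omega)]
    simp only [e5]
    rw [show d + 5 + 1 = d + 6 from by ring]
    rw [F_pick (h := show rateOf (d + 6) ≤ p - 0 + 1 - 2 + 1 - 3 + 1 - 4 + 1 - 5 + 1 - 6 + 1 from by rw [e6]; omega)]
    simp only [e6]
    rw [show d + 6 + 1 = d + 7 from by ring]
    rw [show p - 0 + 1 - 2 + 1 - 3 + 1 - 4 + 1 - 5 + 1 - 6 + 1 - 7 + 1 = p - 20 from by ring]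
    omega
  ·
    have e0 : rateOf d = 2 := by rw [rateOf_eq]; split <;> omega
    have e1 : rateOf (d + 1) = 3 := by rw [rateOf_eq]; split <;> omega
    have e2 : rateOf (d + 2) = 4 := by rw [rateOf_eq]; split <;> omega
    have e3 : rateOf (d + 3) = 5 := by rw [rateOf_eq]; split <;> omega
    have e4 : rateOf (d + 4) = 6 := by rw [rateOf_eq]; split <;> omega
    have e5 : rateOf (d + 5) = 7 := by rw [rateOf_eq]; split <;> omega
    have e6 : rateOf (d + 6) = 0 := by rw [rateOf_eq]; split <;> omega
    rw [show n+7 = n+6+1 from by omega]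
    rw [F_pick (h := show rateOf (d) ≤ p from by rw [e0]; omega)]
    simp only [e0]
    rw [show n+6 = n+5+1 from by omega]
    rw [F_pick (h := show rateOf (d + 1) ≤ p - 2 + 1 from by rw [e1]; omega)]
    simp only [e1]
    rw [show d + 1 + 1 = d + 2 from by ring]
    rw [show n+5 = n+4+1 from by omega]
    rw [F_pick (h := show rateOf (d + 2) ≤ p - 2 + 1 - 3 + 1 from by rw [e2]; omega)]
    simp only [e2]
    rw [show d + 2 + 1 = d + 3 from by ring]
    rw [show n+4 = n+3+1 from by omega]
    rw [F_pick (h := show rateOf (d + 3) ≤ p - 2 + 1 - 3 + 1 - 4 + 1 from by rw [e3]; omega)]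
    simp only [e3]
    rw [show d + 3 + 1 = d + 4 from by ring]
    rw [show n+3 = n+2+1 from by omega]
    rw [F_pick (h := show rateOf (d + 4) ≤ p - 2 + 1 - 3 + 1 - 4 + 1 - 5 + 1 from by rw [e4]; omega)]
    simp only [e4]
    rw [show d + 4 + 1 = d + 5 from by ring]
    rw [show n+2 = n+1+1 from by omega]
    rw [F_pick (h := show rateOf (d + 5) ≤ p - 2 + 1 - 3 + 1 - 4 + 1 - 5 + 1 - 6 + 1 from by rw [e5]; omega)]
    simp only [e5]
    rw [show d + 5 + 1 = d + 6 from by ring]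
    rw [F_pick (h := show rateOf (d + 6) ≤ p - 2 + 1 - 3 + 1 - 4 + 1 - 5 + 1 - 6 + 1 - 7 + 1 from by rw [e6]; omega)]
    simp only [e6]
    rw [show d + 6 + 1 = d + 7 from by ring]
    rw [show p - 2 + 1 - 3 + 1 - 4 + 1 - 5 + 1 - 6 + 1 - 7 + 1 - 0 + 1 = p - 20 from by ring]
    omega
  ·
    have e0 : rateOf d = 3 := by rw [rateOf_eq]; split <;> omega
    have e1 : rateOf (d + 1) = 4 := by rw [rateOf_eq]; split <;> omega
    have e2 : rateOf (d + 2) = 5 := by rw [rateOf_eq]; split <;> omega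
    have e3 : rateOf (d + 3) = 6 := by rw [rateOf_eq]; split <;> omega
    have e4 : rateOf (d + 4) = 7 := by rw [rateOf_eq]; split <;> omega
    have e5 : rateOf (d + 5) = 0 := by rw [rateOf_eq]; split <;> omega
    have e6 : rateOf (d + 6) = 2 := by rw [rateOf_eq]; split <;> omega
    rw [show n+7 = n+6+1 from by omega]
    rw [F_pick (h := show rateOf (d) ≤ p from by rw [e0]; omega)]
    simp only [e0]
    rw [show n+6 = n+5+1 from by omega]
    rw [F_pick (h := show rateOf (d + 1) ≤ p - 3 + 1 from by rw [e1]; omega)]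
    simp only [e1]
    rw [show d + 1 + 1 = d + 2 from by ring]
    rw [show n+5 = n+4+1 from by omega]
    rw [F_pick (h := show rateOf (d + 2) ≤ p - 3 + 1 - 4 + 1 from by rw [e2]; omega)]
    simp only [e2]
    rw [show d + 2 + 1 = d + 3 from by ring]
    rw [show n+4 = n+3+1 from by omega]
    rw [F_pick (h := show rateOf (d + 3) ≤ p - 3 + 1 - 4 + 1 - 5 + 1 from by rw [e3]; omega)]
    simp only [e3]
    rw [show d + 3 + 1 = d + 4 from by ring]
    rw [show n+3 = n+2+1 from by omega]
    rw [F_pick (h := show rateOf (d + 4) ≤ p - 3 + 1 - 4 + 1 - 5 + 1 - 6 + 1 from by rw [e4]; omega)]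
    simp only [e4]
    rw [show d + 4 + 1 = d + 5 from by ring]
    rw [show n+2 = n+1+1 from by omega]
    rw [F_pick (h := show rateOf (d + 5) ≤ p - 3 + 1 - 4 + 1 - 5 + 1 - 6 + 1 - 7 + 1 from by rw [e5]; omega)]
    simp only [e5]
    rw [show d + 5 + 1 = d + 6 from by ring]
    rw [F_pick (h := show rateOf (d + 6) ≤ p - 3 + 1 - 4 + 1 - 5 + 1 - 6 + 1 - 7 + 1 - 0 + 1 from by rw [e6]; omega)]
    simp only [e6]
    rw [show d + 6 + 1 = d + 7 from by ring]
    rw [show p - 3 + 1 - 4 + 1 - 5 + 1 - 6 + 1 - 7 + 1 - 0 + 1 - 2 + 1 = p - 20 from by ring]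
    omega
  ·
    have e0 : rateOf d = 4 := by rw [rateOf_eq]; split <;> omega
    have e1 : rateOf (d + 1) = 5 := by rw [rateOf_eq]; split <;> omega
    have e2 : rateOf (d + 2) = 6 := by rw [rateOf_eq]; split <;> omega
    have e3 : rateOf (d + 3) = 7 := by rw [rateOf_eq]; split <;> omega
    have e4 : rateOf (d + 4) = 0 := by rw [rateOf_eq]; split <;> omega
    have e5 : rateOf (d + 5) = 2 := by rw [rateOf_eq]; split <;> omega
    have e6 : rateOf (d + 6) = 3 := by rw [rateOf_eq]; split <;> omega
    rw [show n+7 = n+6+1 from by omega]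
    rw [F_pick (h := show rateOf (d) ≤ p from by rw [e0]; omega)]
    simp only [e0]
    rw [show n+6 = n+5+1 from by omega]
    rw [F_pick (h := show rateOf (d + 1) ≤ p - 4 + 1 from by rw [e1]; omega)]
    simp only [e1]
    rw [show d + 1 + 1 = d + 2 from by ring]
    rw [show n+5 = n+4+1 from by omega]
    rw [F_pick (h := show rateOf (d + 2) ≤ p - 4 + 1 - 5 + 1 from by rw [e2]; omega)]
    simp only [e2]
    rw [show d + 2 + 1 = d + 3 from by ring]
    rw [show n+4 = n+3+1 from by omega]
    rw [F_pick (h := show rateOf (d + 3) ≤ p - 4 + 1 - 5 + 1 - 6 + 1 from by rw [e3]; omega)]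
    simp only [e3]
    rw [show d + 3 + 1 = d + 4 from by ring]
    rw [show n+3 = n+2+1 from by omega]
    rw [F_pick (h := show rateOf (d + 4) ≤ p - 4 + 1 - 5 + 1 - 6 + 1 - 7 + 1 from by rw [e4]; omega)]
    simp only [e4]
    rw [show d + 4 + 1 = d + 5 from by ring]
    rw [show n+2 = n+1+1 from by omega]
    rw [F_pick (h := show rateOf (d + 5) ≤ p - 4 + 1 - 5 + 1 - 6 + 1 - 7 + 1 - 0 + 1 from by rw [e5]; omega)]
    simp only [e5]
    rw [show d + 5 + 1 = d + 6 from by ring]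
    rw [F_pick (h := show rateOf (d + 6) ≤ p - 4 + 1 - 5 + 1 - 6 + 1 - 7 + 1 - 0 + 1 - 2 + 1 from by rw [e6]; omega)]
    simp only [e6]
    rw [show d + 6 + 1 = d + 7 from by ring]
    rw [show p - 4 + 1 - 5 + 1 - 6 + 1 - 7 + 1 - 0 + 1 - 2 + 1 - 3 + 1 = p - 20 from by ring]
    omega
  ·
    have e0 : rateOf d = 5 := by rw [rateOf_eq]; split <;> omega
    have e1 : rateOf (d + 1) = 6 := by rw [rateOf_eq]; split <;> omega
    have e2 : rateOf (d + 2) = 7 := by rw [rateOf_eq]; split <;> omega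
    have e3 : rateOf (d + 3) = 0 := by rw [rateOf_eq]; split <;> omega
    have e4 : rateOf (d + 4) = 2 := by rw [rateOf_eq]; split <;> omega
    have e5 : rateOf (d + 5) = 3 := by rw [rateOf_eq]; split <;> omega
    have e6 : rateOf (d + 6) = 4 := by rw [rateOf_eq]; split <;> omega
    rw [show n+7 = n+6+1 from by omega]
    rw [F_pick (h := show rateOf (d) ≤ p from by rw [e0]; omega)]
    simp only [e0]
    rw [show n+6 = n+5+1 from by omega]
    rw [F_pick (h := show rateOf (d + 1) ≤ p - 5 + 1 from by rw [e1]; omega)]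
    simp only [e1]
    rw [show d + 1 + 1 = d + 2 from by ring]
    rw [show n+5 = n+4+1 from by omega]
    rw [F_pick (h := show rateOf (d + 2) ≤ p - 5 + 1 - 6 + 1 from by rw [e2]; omega)]
    simp only [e2]
    rw [show d + 2 + 1 = d + 3 from by ring]
    rw [show n+4 = n+3+1 from by omega]
    rw [F_pick (h := show rateOf (d + 3) ≤ p - 5 + 1 - 6 + 1 - 7 + 1 from by rw [e3]; omega)]
    simp only [e3]
    rw [show d + 3 + 1 = d + 4 from by ring]
    rw [show n+3 = n+2+1 from by omega]
    rw [F_pick (h := show rateOf (d + 4) ≤ p - 5 + 1 - 6 + 1 - 7 + 1 - 0 + 1 from by rw [e4]; omega)]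
    simp only [e4]
    rw [show d + 4 + 1 = d + 5 from by ring]
    rw [show n+2 = n+1+1 from by omega]
    rw [F_pick (h := show rateOf (d + 5) ≤ p - 5 + 1 - 6 + 1 - 7 + 1 - 0 + 1 - 2 + 1 from by rw [e5]; omega)]
    simp only [e5]
    rw [show d + 5 + 1 = d + 6 from by ring]
    rw [F_pick (h := show rateOf (d + 6) ≤ p - 5 + 1 - 6 + 1 - 7 + 1 - 0 + 1 - 2 + 1 - 3 + 1 from by rw [e6]; omega)]
    simp only [e6]
    rw [show d + 6 + 1 = d + 7 from by ring]
    rw [show p - 5 + 1 - 6 + 1 - 7 + 1 - 0 + 1 - 2 + 1 - 3 + 1 - 4 + 1 = p - 20 from by ring]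
    omega
  ·
    have e0 : rateOf d = 6 := by rw [rateOf_eq]; split <;> omega
    have e1 : rateOf (d + 1) = 7 := by rw [rateOf_eq]; split <;> omega
    have e2 : rateOf (d + 2) = 0 := by rw [rateOf_eq]; split <;> omega
    have e3 : rateOf (d + 3) = 2 := by rw [rateOf_eq]; split <;> omega
    have e4 : rateOf (d + 4) = 3 := by rw [rateOf_eq]; split <;> omega
    have e5 : rateOf (d + 5) = 4 := by rw [rateOf_eq]; split <;> omega
    have e6 : rateOf (d + 6) = 5 := by rw [rateOf_eq]; split <;> omega
    rw [show n+7 = n+6+1 from by omega]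
    rw [F_pick (h := show rateOf (d) ≤ p from by rw [e0]; omega)]
    simp only [e0]
    rw [show n+6 = n+5+1 from by omega]
    rw [F_pick (h := show rateOf (d + 1) ≤ p - 6 + 1 from by rw [e1]; omega)]
    simp only [e1]
    rw [show d + 1 + 1 = d + 2 from by ring]
    rw [show n+5 = n+4+1 from by omega]
    rw [F_pick (h := show rateOf (d + 2) ≤ p - 6 + 1 - 7 + 1 from by rw [e2]; omega)]
    simp only [e2]
    rw [show d + 2 + 1 = d + 3 from by ring]
    rw [show n+4 = n+3+1 from by omega]
    rw [F_pick (h := show rateOf (d + 3) ≤ p - 6 + 1 - 7 + 1 - 0 + 1 from by rw [e3]; omega)]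
    simp only [e3]
    rw [show d + 3 + 1 = d + 4 from by ring]
    rw [show n+3 = n+2+1 from by omega]
    rw [F_pick (h := show rateOf (d + 4) ≤ p - 6 + 1 - 7 + 1 - 0 + 1 - 2 + 1 from by rw [e4]; omega)]
    simp only [e4]
    rw [show d + 4 + 1 = d + 5 from by ring]
    rw [show n+2 = n+1+1 from by omega]
    rw [F_pick (h := show rateOf (d + 5) ≤ p - 6 + 1 - 7 + 1 - 0 + 1 - 2 + 1 - 3 + 1 from by rw [e5]; omega)]
    simp only [e5]
    rw [show d + 5 + 1 = d + 6 from by ring]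
    rw [F_pick (h := show rateOf (d + 6) ≤ p - 6 + 1 - 7 + 1 - 0 + 1 - 2 + 1 - 3 + 1 - 4 + 1 from by rw [e6]; omega)]
    simp only [e6]
    rw [show d + 6 + 1 = d + 7 from by ring]
    rw [show p - 6 + 1 - 7 + 1 - 0 + 1 - 2 + 1 - 3 + 1 - 4 + 1 - 5 + 1 = p - 20 from by ring]
    omega
  ·
    have e0 : rateOf d = 7 := by rw [rateOf_eq]; split <;> omega
    have e1 : rateOf (d + 1) = 0 := by rw [rateOf_eq]; split <;> omega
    have e2 : rateOf (d + 2) = 2 := by rw [rateOf_eq]; split <;> omega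
    have e3 : rateOf (d + 3) = 3 := by rw [rateOf_eq]; split <;> omega
    have e4 : rateOf (d + 4) = 4 := by rw [rateOf_eq]; split <;> omega
    have e5 : rateOf (d + 5) = 5 := by rw [rateOf_eq]; split <;> omega
    have e6 : rateOf (d + 6) = 6 := by rw [rateOf_eq]; split <;> omega
    rw [show n+7 = n+6+1 from by omega]
    rw [F_pick (h := show rateOf (d) ≤ p from by rw [e0]; omega)]
    simp only [e0]
    rw [show n+6 = n+5+1 from by omega]
    rw [F_pick (h := show rateOf (d + 1) ≤ p - 7 + 1 from by rw [e1]; omega)]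
    simp only [e1]
    rw [show d + 1 + 1 = d + 2 from by ring]
    rw [show n+5 = n+4+1 from by omega]
    rw [F_pick (h := show rateOf (d + 2) ≤ p - 7 + 1 - 0 + 1 from by rw [e2]; omega)]
    simp only [e2]
    rw [show d + 2 + 1 = d + 3 from by ring]
    rw [show n+4 = n+3+1 from by omega]
    rw [F_pick (h := show rateOf (d + 3) ≤ p - 7 + 1 - 0 + 1 - 2 + 1 from by rw [e3]; omega)]
    simp only [e3]
    rw [show d + 3 + 1 = d + 4 from by ring]
    rw [show n+3 = n+2+1 from by omega]
    rw [F_pick (h := show rateOf (d + 4) ≤ p - 7 + 1 - 0 + 1 - 2 + 1 - 3 + 1 from by rw [e4]; omega)]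
    simp only [e4]
    rw [show d + 4 + 1 = d + 5 from by ring]
    rw [show n+2 = n+1+1 from by omega]
    rw [F_pick (h := show rateOf (d + 5) ≤ p - 7 + 1 - 0 + 1 - 2 + 1 - 3 + 1 - 4 + 1 from by rw [e5]; omega)]
    simp only [e5]
    rw [show d + 5 + 1 = d + 6 from by ring]
    rw [F_pick (h := show rateOf (d + 6) ≤ p - 7 + 1 - 0 + 1 - 2 + 1 - 3 + 1 - 4 + 1 - 5 + 1 from by rw [e6]; omega)]
    simp only [e6]
    rw [show d + 6 + 1 = d + 7 from by ring]
    rw [show p - 7 + 1 - 0 + 1 - 2 + 1 - 3 + 1 - 4 + 1 - 5 + 1 - 6 + 1 = p - 20 from by ring]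
    omega

theorem Pop_week (n : Nat) (d p : Int) (hp : 27 ≤ p) :
    Pop (n+7) d p = Pop n (d+7) (p-20) := by
  rcases (show d % 7 = 0 ∨ d % 7 = 1 ∨ d % 7 = 2 ∨ d % 7 = 3 ∨ d % 7 = 4 ∨ d % 7 = 5 ∨ d % 7 = 6 from by omega) with hm|hm|hm|hm|hm|hm|hm
  ·
    have e0 : rateOf d = 0 := by rw [rateOf_eq]; split <;> omega
    have e1 : rateOf (d + 1) = 2 := by rw [rateOf_eq]; split <;> omega
    have e2 : rateOf (d + 2) = 3 := by rw [rateOf_eq]; split <;> omega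
    have e3 : rateOf (d + 3) = 4 := by rw [rateOf_eq]; split <;> omega
    have e4 : rateOf (d + 4) = 5 := by rw [rateOf_eq]; split <;> omega
    have e5 : rateOf (d + 5) = 6 := by rw [rateOf_eq]; split <;> omega
    have e6 : rateOf (d + 6) = 7 := by rw [rateOf_eq]; split <;> omega
    rw [show n+7 = n+6+1 from by omega]
    rw [Pop_pick (h := show rateOf (d) ≤ p from by rw [e0]; omega)]
    simp only [e0]
    rw [show n+6 = n+5+1 from by omega]
    rw [Pop_pick (h := show rateOf (d + 1) ≤ p - 0 + 1 from by rw [e1]; omega)]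
    simp only [e1]
    rw [show d + 1 + 1 = d + 2 from by ring]
    rw [show n+5 = n+4+1 from by omega]
    rw [Pop_pick (h := show rateOf (d + 2) ≤ p - 0 + 1 - 2 + 1 from by rw [e2]; omega)]
    simp only [e2]
    rw [show d + 2 + 1 = d + 3 from by ring]
    rw [show n+4 = n+3+1 from by omega]
    rw [Pop_pick (h := show rateOf (d + 3) ≤ p - 0 + 1 - 2 + 1 - 3 + 1 from by rw [e3]; omega)]
    simp only [e3]
    rw [show d + 3 + 1 = d + 4 from by ring]
    rw [show n+3 = n+2+1 from by omega]
    rw [Pop_pick (h := show rateOf (d + 4) ≤ p - 0 + 1 - 2 + 1 - 3 + 1 - 4 + 1 from by rw [e4]; omega)]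
    simp only [e4]
    rw [show d + 4 + 1 = d + 5 from by ring]
    rw [show n+2 = n+1+1 from by omega]
    rw [Pop_pick (h := show rateOf (d + 5) ≤ p - 0 + 1 - 2 + 1 - 3 + 1 - 4 + 1 - 5 + 1 from by rw [e5]; omega)]
    simp only [e5]
    rw [show d + 5 + 1 = d + 6 from by ring]
    rw [Pop_pick (h := show rateOf (d + 6) ≤ p - 0 + 1 - 2 + 1 - 3 + 1 - 4 + 1 - 5 + 1 - 6 + 1 from by rw [e6]; omega)]
    simp only [e6]
    rw [show d + 6 + 1 = d + 7 from by ring]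
    rw [show p - 0 + 1 - 2 + 1 - 3 + 1 - 4 + 1 - 5 + 1 - 6 + 1 - 7 + 1 = p - 20 from by ring]
  ·
    have e0 : rateOf d = 2 := by rw [rateOf_eq]; split <;> omega
    have e1 : rateOf (d + 1) = 3 := by rw [rateOf_eq]; split <;> omega
    have e2 : rateOf (d + 2) = 4 := by rw [rateOf_eq]; split <;> omega
    have e3 : rateOf (d + 3) = 5 := by rw [rateOf_eq]; split <;> omega
    have e4 : rateOf (d + 4) = 6 := by rw [rateOf_eq]; split <;> omega
    have e5 : rateOf (d + 5) = 7 := by rw [rateOf_eq]; split <;> omega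
    have e6 : rateOf (d + 6) = 0 := by rw [rateOf_eq]; split <;> omega
    rw [show n+7 = n+6+1 from by omega]
    rw [Pop_pick (h := show rateOf (d) ≤ p from by rw [e0]; omega)]
    simp only [e0]
    rw [show n+6 = n+5+1 from by omega]
    rw [Pop_pick (h := show rateOf (d + 1) ≤ p - 2 + 1 from by rw [e1]; omega)]
    simp only [e1]
    rw [show d + 1 + 1 = d + 2 from by ring]
    rw [show n+5 = n+4+1 from by omega]
    rw [Pop_pick (h := show rateOf (d + 2) ≤ p - 2 + 1 - 3 + 1 from by rw [e2]; omega)]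
    simp only [e2]
    rw [show d + 2 + 1 = d + 3 from by ring]
    rw [show n+4 = n+3+1 from by omega]
    rw [Pop_pick (h := show rateOf (d + 3) ≤ p - 2 + 1 - 3 + 1 - 4 + 1 from by rw [e3]; omega)]
    simp only [e3]
    rw [show d + 3 + 1 = d + 4 from by ring]
    rw [show n+3 = n+2+1 from by omega]
    rw [Pop_pick (h := show rateOf (d + 4) ≤ p - 2 + 1 - 3 + 1 - 4 + 1 - 5 + 1 from by rw [e4]; omega)]
    simp only [e4]
    rw [show d + 4 + 1 = d + 5 from by ring]
    rw [show n+2 = n+1+1 from by omega]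
    rw [Pop_pick (h := show rateOf (d + 5) ≤ p - 2 + 1 - 3 + 1 - 4 + 1 - 5 + 1 - 6 + 1 from by rw [e5]; omega)]
    simp only [e5]
    rw [show d + 5 + 1 = d + 6 from by ring]
    rw [Pop_pick (h := show rateOf (d + 6) ≤ p - 2 + 1 - 3 + 1 - 4 + 1 - 5 + 1 - 6 + 1 - 7 + 1 from by rw [e6]; omega)]
    simp only [e6]
    rw [show d + 6 + 1 = d + 7 from by ring]
    rw [show p - 2 + 1 - 3 + 1 - 4 + 1 - 5 + 1 - 6 + 1 - 7 + 1 - 0 + 1 = p - 20 from by ring]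
  ·
    have e0 : rateOf d = 3 := by rw [rateOf_eq]; split <;> omega
    have e1 : rateOf (d + 1) = 4 := by rw [rateOf_eq]; split <;> omega
    have e2 : rateOf (d + 2) = 5 := by rw [rateOf_eq]; split <;> omega
    have e3 : rateOf (d + 3) = 6 := by rw [rateOf_eq]; split <;> omega
    have e4 : rateOf (d + 4) = 7 := by rw [rateOf_eq]; split <;> omega
    have e5 : rateOf (d + 5) = 0 := by rw [rateOf_eq]; split <;> omega
    have e6 : rateOf (d + 6) = 2 := by rw [rateOf_eq]; split <;> omega
    rw [show n+7 = n+6+1 from by omega]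
    rw [Pop_pick (h := show rateOf (d) ≤ p from by rw [e0]; omega)]
    simp only [e0]
    rw [show n+6 = n+5+1 from by omega]
    rw [Pop_pick (h := show rateOf (d + 1) ≤ p - 3 + 1 from by rw [e1]; omega)]
    simp only [e1]
    rw [show d + 1 + 1 = d + 2 from by ring]
    rw [show n+5 = n+4+1 from by omega]
    rw [Pop_pick (h := show rateOf (d + 2) ≤ p - 3 + 1 - 4 + 1 from by rw [e2]; omega)]
    simp only [e2]
    rw [show d + 2 + 1 = d + 3 from by ring]
    rw [show n+4 = n+3+1 from by omega]
    rw [Pop_pick (h := show rateOf (d + 3) ≤ p - 3 + 1 - 4 + 1 - 5 + 1 from by rw [e3]; omega)]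
    simp only [e3]
    rw [show d + 3 + 1 = d + 4 from by ring]
    rw [show n+3 = n+2+1 from by omega]
    rw [Pop_pick (h := show rateOf (d + 4) ≤ p - 3 + 1 - 4 + 1 - 5 + 1 - 6 + 1 from by rw [e4]; omega)]
    simp only [e4]
    rw [show d + 4 + 1 = d + 5 from by ring]
    rw [show n+2 = n+1+1 from by omega]
    rw [Pop_pick (h := show rateOf (d + 5) ≤ p - 3 + 1 - 4 + 1 - 5 + 1 - 6 + 1 - 7 + 1 from by rw [e5]; omega)]
    simp only [e5]
    rw [show d + 5 + 1 = d + 6 from by ring]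
    rw [Pop_pick (h := show rateOf (d + 6) ≤ p - 3 + 1 - 4 + 1 - 5 + 1 - 6 + 1 - 7 + 1 - 0 + 1 from by rw [e6]; omega)]
    simp only [e6]
    rw [show d + 6 + 1 = d + 7 from by ring]
    rw [show p - 3 + 1 - 4 + 1 - 5 + 1 - 6 + 1 - 7 + 1 - 0 + 1 - 2 + 1 = p - 20 from by ring]
  ·
    have e0 : rateOf d = 4 := by rw [rateOf_eq]; split <;> omega
    have e1 : rateOf (d + 1) = 5 := by rw [rateOf_eq]; split <;> omega
    have e2 : rateOf (d + 2) = 6 := by rw [rateOf_eq]; split <;> omega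
    have e3 : rateOf (d + 3) = 7 := by rw [rateOf_eq]; split <;> omega
    have e4 : rateOf (d + 4) = 0 := by rw [rateOf_eq]; split <;> omega
    have e5 : rateOf (d + 5) = 2 := by rw [rateOf_eq]; split <;> omega
    have e6 : rateOf (d + 6) = 3 := by rw [rateOf_eq]; split <;> omega
    rw [show n+7 = n+6+1 from by omega]
    rw [Pop_pick (h := show rateOf (d) ≤ p from by rw [e0]; omega)]
    simp only [e0]
    rw [show n+6 = n+5+1 from by omega]
    rw [Pop_pick (h := show rateOf (d + 1) ≤ p - 4 + 1 from by rw [e1]; omega)]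
    simp only [e1]
    rw [show d + 1 + 1 = d + 2 from by ring]
    rw [show n+5 = n+4+1 from by omega]
    rw [Pop_pick (h := show rateOf (d + 2) ≤ p - 4 + 1 - 5 + 1 from by rw [e2]; omega)]
    simp only [e2]
    rw [show d + 2 + 1 = d + 3 from by ring]
    rw [show n+4 = n+3+1 from by omega]
    rw [Pop_pick (h := show rateOf (d + 3) ≤ p - 4 + 1 - 5 + 1 - 6 + 1 from by rw [e3]; omega)]
    simp only [e3]
    rw [show d + 3 + 1 = d + 4 from by ring]
    rw [show n+3 = n+2+1 from by omega]
    rw [Pop_pick (h := show rateOf (d + 4) ≤ p - 4 + 1 - 5 + 1 - 6 + 1 - 7 + 1 from by rw [e4]; omega)]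
    simp only [e4]
    rw [show d + 4 + 1 = d + 5 from by ring]
    rw [show n+2 = n+1+1 from by omega]
    rw [Pop_pick (h := show rateOf (d + 5) ≤ p - 4 + 1 - 5 + 1 - 6 + 1 - 7 + 1 - 0 + 1 from by rw [e5]; omega)]
    simp only [e5]
    rw [show d + 5 + 1 = d + 6 from by ring]
    rw [Pop_pick (h := show rateOf (d + 6) ≤ p - 4 + 1 - 5 + 1 - 6 + 1 - 7 + 1 - 0 + 1 - 2 + 1 from by rw [e6]; omega)]
    simp only [e6]
    rw [show d + 6 + 1 = d + 7 from by ring]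
    rw [show p - 4 + 1 - 5 + 1 - 6 + 1 - 7 + 1 - 0 + 1 - 2 + 1 - 3 + 1 = p - 20 from by ring]
  ·
    have e0 : rateOf d = 5 := by rw [rateOf_eq]; split <;> omega
    have e1 : rateOf (d + 1) = 6 := by rw [rateOf_eq]; split <;> omega
    have e2 : rateOf (d + 2) = 7 := by rw [rateOf_eq]; split <;> omega
    have e3 : rateOf (d + 3) = 0 := by rw [rateOf_eq]; split <;> omega
    have e4 : rateOf (d + 4) = 2 := by rw [rateOf_eq]; split <;> omega
    have e5 : rateOf (d + 5) = 3 := by rw [rateOf_eq]; split <;> omega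
    have e6 : rateOf (d + 6) = 4 := by rw [rateOf_eq]; split <;> omega
    rw [show n+7 = n+6+1 from by omega]
    rw [Pop_pick (h := show rateOf (d) ≤ p from by rw [e0]; omega)]
    simp only [e0]
    rw [show n+6 = n+5+1 from by omega]
    rw [Pop_pick (h := show rateOf (d + 1) ≤ p - 5 + 1 from by rw [e1]; omega)]
    simp only [e1]
    rw [show d + 1 + 1 = d + 2 from by ring]
    rw [show n+5 = n+4+1 from by omega]
    rw [Pop_pick (h := show rateOf (d + 2) ≤ p - 5 + 1 - 6 + 1 from by rw [e2]; omega)]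
    simp only [e2]
    rw [show d + 2 + 1 = d + 3 from by ring]
    rw [show n+4 = n+3+1 from by omega]
    rw [Pop_pick (h := show rateOf (d + 3) ≤ p - 5 + 1 - 6 + 1 - 7 + 1 from by rw [e3]; omega)]
    simp only [e3]
    rw [show d + 3 + 1 = d + 4 from by ring]
    rw [show n+3 = n+2+1 from by omega]
    rw [Pop_pick (h := show rateOf (d + 4) ≤ p - 5 + 1 - 6 + 1 - 7 + 1 - 0 + 1 from by rw [e4]; omega)]
    simp only [e4]
    rw [show d + 4 + 1 = d + 5 from by ring]
    rw [show n+2 = n+1+1 from by omega]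
    rw [Pop_pick (h := show rateOf (d + 5) ≤ p - 5 + 1 - 6 + 1 - 7 + 1 - 0 + 1 - 2 + 1 from by rw [e5]; omega)]
    simp only [e5]
    rw [show d + 5 + 1 = d + 6 from by ring]
    rw [Pop_pick (h := show rateOf (d + 6) ≤ p - 5 + 1 - 6 + 1 - 7 + 1 - 0 + 1 - 2 + 1 - 3 + 1 from by rw [e6]; omega)]
    simp only [e6]
    rw [show d + 6 + 1 = d + 7 from by ring]
    rw [show p - 5 + 1 - 6 + 1 - 7 + 1 - 0 + 1 - 2 + 1 - 3 + 1 - 4 + 1 = p - 20 from by ring]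
  ·
    have e0 : rateOf d = 6 := by rw [rateOf_eq]; split <;> omega
    have e1 : rateOf (d + 1) = 7 := by rw [rateOf_eq]; split <;> omega
    have e2 : rateOf (d + 2) = 0 := by rw [rateOf_eq]; split <;> omega
    have e3 : rateOf (d + 3) = 2 := by rw [rateOf_eq]; split <;> omega
    have e4 : rateOf (d + 4) = 3 := by rw [rateOf_eq]; split <;> omega
    have e5 : rateOf (d + 5) = 4 := by rw [rateOf_eq]; split <;> omega
    have e6 : rateOf (d + 6) = 5 := by rw [rateOf_eq]; split <;> omega
    rw [show n+7 = n+6+1 from by omega]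
    rw [Pop_pick (h := show rateOf (d) ≤ p from by rw [e0]; omega)]
    simp only [e0]
    rw [show n+6 = n+5+1 from by omega]
    rw [Pop_pick (h := show rateOf (d + 1) ≤ p - 6 + 1 from by rw [e1]; omega)]
    simp only [e1]
    rw [show d + 1 + 1 = d + 2 from by ring]
    rw [show n+5 = n+4+1 from by omega]
    rw [Pop_pick (h := show rateOf (d + 2) ≤ p - 6 + 1 - 7 + 1 from by rw [e2]; omega)]
    simp only [e2]
    rw [show d + 2 + 1 = d + 3 from by ring]
    rw [show n+4 = n+3+1 from by omega]
    rw [Pop_pick (h := show rateOf (d + 3) ≤ p - 6 + 1 - 7 + 1 - 0 + 1 from by rw [e3]; omega)]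
    simp only [e3]
    rw [show d + 3 + 1 = d + 4 from by ring]
    rw [show n+3 = n+2+1 from by omega]
    rw [Pop_pick (h := show rateOf (d + 4) ≤ p - 6 + 1 - 7 + 1 - 0 + 1 - 2 + 1 from by rw [e4]; omega)]
    simp only [e4]
    rw [show d + 4 + 1 = d + 5 from by ring]
    rw [show n+2 = n+1+1 from by omega]
    rw [Pop_pick (h := show rateOf (d + 5) ≤ p - 6 + 1 - 7 + 1 - 0 + 1 - 2 + 1 - 3 + 1 from by rw [e5]; omega)]
    simp only [e5]
    rw [show d + 5 + 1 = d + 6 from by ring]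
    rw [Pop_pick (h := show rateOf (d + 6) ≤ p - 6 + 1 - 7 + 1 - 0 + 1 - 2 + 1 - 3 + 1 - 4 + 1 from by rw [e6]; omega)]
    simp only [e6]
    rw [show d + 6 + 1 = d + 7 from by ring]
    rw [show p - 6 + 1 - 7 + 1 - 0 + 1 - 2 + 1 - 3 + 1 - 4 + 1 - 5 + 1 = p - 20 from by ring]
  ·
    have e0 : rateOf d = 7 := by rw [rateOf_eq]; split <;> omega
    have e1 : rateOf (d + 1) = 0 := by rw [rateOf_eq]; split <;> omega
    have e2 : rateOf (d + 2) = 2 := by rw [rateOf_eq]; split <;> omega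
    have e3 : rateOf (d + 3) = 3 := by rw [rateOf_eq]; split <;> omega
    have e4 : rateOf (d + 4) = 4 := by rw [rateOf_eq]; split <;> omega
    have e5 : rateOf (d + 5) = 5 := by rw [rateOf_eq]; split <;> omega
    have e6 : rateOf (d + 6) = 6 := by rw [rateOf_eq]; split <;> omega
    rw [show n+7 = n+6+1 from by omega]
    rw [Pop_pick (h := show rateOf (d) ≤ p from by rw [e0]; omega)]
    simp only [e0]
    rw [show n+6 = n+5+1 from by omega]
    rw [Pop_pick (h := show rateOf (d + 1) ≤ p - 7 + 1 from by rw [e1]; omega)]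
    simp only [e1]
    rw [show d + 1 + 1 = d + 2 from by ring]
    rw [show n+5 = n+4+1 from by omega]
    rw [Pop_pick (h := show rateOf (d + 2) ≤ p - 7 + 1 - 0 + 1 from by rw [e2]; omega)]
    simp only [e2]
    rw [show d + 2 + 1 = d + 3 from by ring]
    rw [show n+4 = n+3+1 from by omega]
    rw [Pop_pick (h := show rateOf (d + 3) ≤ p - 7 + 1 - 0 + 1 - 2 + 1 from by rw [e3]; omega)]
    simp only [e3]
    rw [show d + 3 + 1 = d + 4 from by ring]
    rw [show n+3 = n+2+1 from by omega]
    rw [Pop_pick (h := show rateOf (d + 4) ≤ p - 7 + 1 - 0 + 1 - 2 + 1 - 3 + 1 from by rw [e4]; omega)]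
    simp only [e4]
    rw [show d + 4 + 1 = d + 5 from by ring]
    rw [show n+2 = n+1+1 from by omega]
    rw [Pop_pick (h := show rateOf (d + 5) ≤ p - 7 + 1 - 0 + 1 - 2 + 1 - 3 + 1 - 4 + 1 from by rw [e5]; omega)]
    simp only [e5]
    rw [show d + 5 + 1 = d + 6 from by ring]
    rw [Pop_pick (h := show rateOf (d + 6) ≤ p - 7 + 1 - 0 + 1 - 2 + 1 - 3 + 1 - 4 + 1 - 5 + 1 from by rw [e6]; omega)]
    simp only [e6]
    rw [show d + 6 + 1 = d + 7 from by ring]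
    rw [show p - 7 + 1 - 0 + 1 - 2 + 1 - 3 + 1 - 4 + 1 - 5 + 1 - 6 + 1 = p - 20 from by ring]


-- k consecutive full weeks, population high enough throughout
theorem FPop_weeks : ∀ (k : Nat) (n : Nat) (d p : Int), 27 + 20*(k:Int) ≤ p + 20 →
    F (7*k + n) d p = 27*k + F n (d + 7*k) (p - 20*k) ∧
    Pop (7*k + n) d p = Pop n (d + 7*k) (p - 20*k) := by
  intro k
  induction k with
  | zero => intro n d p _; simp
  | succ k ih =>
    intro n d p hp
    have hp' : 27 ≤ p := by push_cast at hp ⊢; omega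
    have hcnt : 7*(k+1) + n = (7*k + n) + 7 := by omega
    rw [hcnt, F_week _ _ _ hp', Pop_week _ _ _ hp']
    have hrec := ih n (d+7) (p-20) (by push_cast at hp ⊢; omega)
    rw [hrec.1, hrec.2]
    have hd : d + 7 + 7*(k:Int) = d + 7*((k:Nat)+1 : Nat) := by push_cast; ring
    have hq : p - 20 - 20*(k:Int) = p - 20*((k:Nat)+1 : Nat) := by push_cast; ring
    rw [hd, hq]
    constructor
    · push_cast; ring
    · rfl

-- negative population: k days with no picks
theorem FPop_negskip : ∀ (k : Nat) (n : Nat) (d p : Int), p + k ≤ 0 →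
    F (k + n) d p = F n (d + k) (p + k) ∧ Pop (k + n) d p = Pop n (d + k) (p + k) := by
  intro k
  induction k with
  | zero => intro n d p _; simp
  | succ k ih =>
    intro n d p hp
    have hc : ¬ rateOf d ≤ p := by have := rate_nonneg d; push_cast at hp; omega
    have hcnt : (k+1) + n = (k + n) + 1 := by omega
    rw [hcnt, F_nopick hc, Pop_nopick hc]
    have hrec := ih n (d+1) (p+1) (by push_cast at hp ⊢; omega)
    have hd : d + 1 + (k:Int) = d + ((k:Nat)+1 : Nat) := by push_cast; ring
    have hq : p + 1 + (k:Int) = p + ((k:Nat)+1 : Nat) := by push_cast; ring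
    rw [hrec.1, hrec.2, hd, hq]
    exact ⟨rfl, rfl⟩

theorem Pop_nonneg : ∀ (n : Nat) (d p : Int), 0 ≤ p → 0 ≤ Pop n d p := by
  intro n
  induction n with
  | zero => intro d p h; simpa [Pop] using h
  | succ n ih =>
    intro d p h
    by_cases hc : rateOf d ≤ p
    · rw [Pop_pick hc]; exact ih _ _ (by omega)
    · rw [Pop_nopick hc]; exact ih _ _ (by omega)

-- the two attracting 14-day cycles of the low-population regime (phase = day % 7)
def attr : List (Int × Int) :=
  [(0, 4), (0, 5), (0, 6), (0, 7), (1, 5), (1, 6), (1, 7), (1, 8),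
   (2, 4), (2, 5), (2, 6), (2, 7), (3, 2), (3, 3), (3, 4), (3, 5),
   (4, 1), (4, 2), (4, 3), (4, 4), (5, 2), (5, 3), (5, 4), (5, 5),
   (6, 3), (6, 4), (6, 5), (6, 6)]

-- every attractor state returns to itself after 14 days, picking exactly 14
theorem attr_cycle : ∀ s ∈ attr, F 14 s.1 s.2 = 14 ∧ Pop 14 s.1 s.2 = s.2 := by decide

-- from any state with 0 ≤ pop < 27, 20 days of simulation land on an attractor state
theorem attr_transient : ∀ dn : Nat, dn < 7 → ∀ pn : Nat, pn < 27 →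
    (((dn:Int) + 20) % 7, Pop 20 (dn:Int) (pn:Int)) ∈ attr := by decide

-- repeating the 14-day cycle q times from an attractor state
theorem F_cycles : ∀ (q : Nat) (m : Nat) (d p : Int), ((d % 7, p) ∈ attr) →
    F (14*q + m) d p = 14*(q:Int) + F m d p := by
  intro q
  induction q with
  | zero => intro m d p _; simp
  | succ q ih =>
    intro m d p hmem
    have hcnt : 14*(q+1) + m = 14 + (14*q + m) := by omega
    have hadd := FPop_add 14 (14*q + m) d p
    have hattr := attr_cycle _ hmem
    have hF14 : F 14 d p = 14 := by
      rw [(FPop_congr 14 d (d % 7) p (by omega)).1]; exact hattr.1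
    have hP14 : Pop 14 d p = p := by
      rw [(FPop_congr 14 d (d % 7) p (by omega)).2]; exact hattr.2
    have hmem' : ((d + (14:Nat)) % 7, p) ∈ attr := by
      have : (d + (14:Nat)) % 7 = d % 7 := by push_cast; omega
      rw [this]; exact hmem
    rw [hcnt, hadd.1, hF14, hP14, ih m (d + (14:Nat)) p hmem',
        (FPop_congr m (d + (14:Nat)) d p (by push_cast; omega)).1]
    push_cast; ring

-- Source B's simdays computes (d + k, Pop k d p, t + F k d p)
theorem simdays_eq : ∀ (k : Nat) (d p t : Int),
    simdays k d p t = (d + k, Pop k d p, t + F k d p) := by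
  intro k
  induction k with
  | zero => intro d p t; simp [simdays, Pop, F]
  | succ k ih =>
    intro d p t
    have hr : PySem.List.pyGetD pickRate (PySem.Int.mod d 7) 0 = rateOf d := rfl
    have hd : d + 1 + (k:Int) = d + ((k:Nat)+1 : Nat) := by push_cast; ring
    by_cases hc : rateOf d ≤ p
    · simp only [simdays, hr, if_pos hc, ih, F_pick hc, Pop_pick hc, hd, add_assoc]
    · simp only [simdays, hr, if_neg hc, ih, F_nopick hc, Pop_nopick hc, hd]

theorem bLoop_zero (d p t n : Int) (hn : ¬ 0 < n) : bLoop d p t n = t := by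
  rw [bLoop, dif_neg hn]

-- the main loop of B computes t + F n d p (for 0 ≤ pop)
theorem bLoop_eq_aux : ∀ (N : Nat) (n d p t : Int), n.toNat ≤ N → 0 ≤ p →
    bLoop d p t n = t + F n.toNat d p := by
  intro N
  induction N with
  | zero =>
    intro n d p t hN _
    rw [bLoop_zero d p t n (by omega)]
    rw [show n.toNat = 0 from by omega]
    simp [F]
  | succ N ih =>
    intro n d p t hN hp
    by_cases h0 : 0 < n
    · rw [bLoop, dif_pos h0]
      by_cases hb : 27 ≤ p ∧ 7 ≤ n
      · rw [dif_pos hb]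
        show bLoop (d + 7 * min (PySem.Int.floordiv n 7) (PySem.Int.floordiv (p - 27) 20 + 1))
            (p - 20 * min (PySem.Int.floordiv n 7) (PySem.Int.floordiv (p - 27) 20 + 1))
            (t + 27 * min (PySem.Int.floordiv n 7) (PySem.Int.floordiv (p - 27) 20 + 1))
            (n - 7 * min (PySem.Int.floordiv n 7) (PySem.Int.floordiv (p - 27) 20 + 1)) =
            t + F n.toNat d p
        rw [PySem.Int.floordiv_eq_ediv_of_pos (by norm_num),
            PySem.Int.floordiv_eq_ediv_of_pos (by norm_num)]
        set K := min (n / 7) ((p - 27) / 20 + 1) with hK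
        have hk1 : 1 ≤ K := by rw [hK]; omega
        have hk7 : 7 * K ≤ n := by rw [hK]; omega
        have hk20 : 20 * K ≤ p - 7 := by rw [hK]; omega
        have hKt : ((K.toNat : Int)) = K := by omega
        rw [ih (n - 7*K) (d + 7*K) (p - 20*K) (t + 27*K) (by omega) (by omega)]
        have hw1 := (FPop_weeks K.toNat ((n - 7*K).toNat) d p (by omega)).1
        push_cast at hw1
        rw [hKt] at hw1
        rw [show n.toNat = 7 * K.toNat + (n - 7*K).toNat from by omega, hw1]
        omega
      · rw [dif_neg hb]
        by_cases hc : 34 < n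
        · rw [dif_pos hc]
          show bLoop ((simdays 20 d p t).1 + PySem.Int.floordiv (n - 20) 14 * 14)
              ((simdays 20 d p t).2.1)
              ((simdays 20 d p t).2.2 + PySem.Int.floordiv (n - 20) 14 * 14)
              (n - 20 - PySem.Int.floordiv (n - 20) 14 * 14) = t + F n.toNat d p
          rw [PySem.Int.floordiv_eq_ediv_of_pos (by norm_num), simdays_eq]
          set q : Int := (n - 20) / 14 with hq
          have hq1 : 1 ≤ q := by rw [hq]; omega
          have hqt : ((q.toNat : Int)) = q := by omega
          have hp27 : p < 27 := by omega
          -- after 20 days from (d, p) we are on an attractor state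
          have hdn := attr_transient (d % 7).toNat (by omega) p.toNat (by omega)
          rw [show (((d % 7).toNat : Int)) = d % 7 from by omega,
              show ((p.toNat : Int)) = p from by omega] at hdn
          have hmem : ((d + 20) % 7, Pop 20 d p) ∈ attr := by
            rw [show (d + 20) % 7 = ((d % 7) + 20) % 7 from by omega,
                (FPop_congr 20 d (d % 7) p (by omega)).2]
            exact hdn
          have hP0 : 0 ≤ Pop 20 d p := Pop_nonneg 20 d p hp
          simp only [show (d + ((20:Nat):Int)) = d + 20 from by push_cast; ring]
          rw [ih (n - 20 - q * 14) (d + 20 + q * 14) (Pop 20 d p)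
              (t + F 20 d p + q * 14) (by omega) hP0]
          have hcyc := F_cycles q.toNat ((n - 20 - q*14).toNat) (d + 20) (Pop 20 d p) hmem
          have hadd := (FPop_add 20 ((n - 20).toNat) d p).1
          push_cast at hadd
          rw [(FPop_congr ((n - 20 - q*14).toNat) (d + 20 + q * 14) (d + 20) (Pop 20 d p)
              (by omega)).1]
          rw [show n.toNat = 20 + (n - 20).toNat from by omega, hadd,
              show (n - 20).toNat = 14 * q.toNat + (n - 20 - q*14).toNat from by omega,
              hcyc, hqt]
          omega
        · rw [dif_neg hc]
          show bLoop ((simdays 1 d p t).1) ((simdays 1 d p t).2.1) ((simdays 1 d p t).2.2)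
              (n - 1) = t + F n.toNat d p
          rw [simdays_eq]
          have hP0 : 0 ≤ Pop 1 d p := Pop_nonneg 1 d p hp
          rw [ih (n - 1) (d + ((1:Nat):Int)) (Pop 1 d p) (t + F 1 d p) (by omega) hP0]
          have hadd := (FPop_add 1 ((n - 1).toNat) d p).1
          rw [show n.toNat = 1 + (n - 1).toNat from by omega, hadd]
          omega
    · rw [bLoop_zero d p t n h0, show n.toNat = 0 from by omega]
      simp [F]

theorem bLoop_eq (n d p t : Int) (hp : 0 ≤ p) : bLoop d p t n = t + F n.toNat d p :=
  bLoop_eq_aux n.toNat n d p t le_rfl hp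

-- the rate expression in A's port (index via len(pickRate)) is rateOf
theorem rateA (day : Int) :
    PySem.List.pyGetD pickRate (PySem.Int.mod day (pickRate.length : Int)) 0 = rateOf day := by
  norm_num [pickRate, rateOf]

-- A's fold over range(a, a+m) computes (Pop m a p, acc + F m a p)
theorem foldA : ∀ (m : Nat) (a p acc : Int),
    ((PySem.List.pyRange a (a + m) 1).foldl
      (fun (st : Int × Int) day =>
        let currentPickRate := PySem.List.pyGetD pickRate (PySem.Int.mod day (pickRate.length : Int)) 0
        if currentPickRate ≤ st.1 then (st.1 - currentPickRate + 1, st.2 + currentPickRate)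
        else (st.1 + 1, st.2))
      (p, acc)) = (Pop m a p, acc + F m a p) := by
  intro m
  induction m with
  | zero =>
    intro a p acc
    rw [PySem.List.pyRange_one_eq_nil (by push_cast; omega)]
    simp [Pop, F]
  | succ m ih =>
    intro a p acc
    have hhead : (let currentPickRate := PySem.List.pyGetD pickRate (PySem.Int.mod a (pickRate.length : Int)) 0
        if currentPickRate ≤ (p, acc).1 then ((p, acc).1 - currentPickRate + 1, (p, acc).2 + currentPickRate)
        else ((p, acc).1 + 1, (p, acc).2)) =
        if rateOf a ≤ p then (p - rateOf a + 1, acc + rateOf a) else (p + 1, acc) := by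
      simp [rateA]
    rw [PySem.List.pyRange_one_cons (by push_cast; omega), List.foldl_cons, hhead]
    have hab : a + ((m:Nat)+1 : Nat) = (a + 1) + ((m:Nat) : Nat) := by push_cast; ring
    rw [hab]
    by_cases hc : rateOf a ≤ p
    · rw [if_pos hc, ih, F_pick hc, Pop_pick hc]
      simp only [Prod.mk.injEq]
      exact ⟨trivial, by ring⟩
    · rw [if_neg hc, ih, F_nopick hc, Pop_nopick hc]

theorem picked_eq_F (startDay startPop life : Int) :
    picked startDay startPop life = F life.toNat startDay startPop := by
  unfold picked
  by_cases hl : 0 < life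
  · rw [show life + startDay = (0 + startDay) + ((life.toNat : Nat) : Int) from by omega]
    rw [foldA]
    show 0 + F life.toNat (0 + startDay) startPop = F life.toNat startDay startPop
    rw [zero_add, (FPop_congr life.toNat (0 + startDay) startDay startPop (by omega)).1]
  · rw [PySem.List.pyRange_one_eq_nil (by omega)]
    rw [show life.toNat = 0 from by omega]
    simp [F]

theorem picked_alt_eq_F (startDay startPop life : Int) :
    picked_alt startDay startPop life = F life.toNat startDay startPop := by
  unfold picked_alt
  by_cases hl : 0 < life
  · rw [if_pos hl]
    by_cases hneg : 0 < life ∧ startPop < 0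
    · rw [if_pos hneg]
      by_cases hmin : life ≤ -startPop
      · rw [min_eq_left hmin, bLoop_zero _ _ _ _ (by omega)]
        have hns := (FPop_negskip life.toNat 0 startDay startPop (by omega)).1
        rw [show life.toNat + 0 = life.toNat from by omega] at hns
        rw [hns]
        simp [F]
      · rw [min_eq_right (by omega : -startPop ≤ life)]
        rw [bLoop_eq (life - -startPop) (startDay + -startPop) (startPop + -startPop) 0
            (by omega)]
        have hns := (FPop_negskip ((-startPop).toNat) ((life - -startPop).toNat) startDay
            startPop (by omega)).1
        rw [show (-startPop).toNat + (life - -startPop).toNat = life.toNat from by omega,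
            show ((((-startPop).toNat : Nat)) : Int) = -startPop from by omega] at hns
        rw [hns]
        omega
    · rw [if_neg hneg]
      rw [bLoop_eq life startDay startPop 0 (by omega)]
      omega
  · rw [if_neg hl, if_neg (by omega)]
    rw [bLoop_zero _ _ _ _ (by omega), show life.toNat = 0 from by omega]
    simp [F]

-- ===== VERDICT (by name: the statement is the Claim_ definition above) =====
theorem picked_spec : Claim_equal_picked := by
  intro startDay startPop life _
  unfold Spec_picked
  rw [picked_eq_F, picked_alt_eq_F]
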